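-- pv_equiv track=rewrite | github.com/tdighadw/HXP | DroneCoverage/env.py | max_env_reward
-- ===== SOURCE A (Python) =====
-- def max_env_reward(agents, dones=None, reward_type="B"):
--     max_reward = 0
--     for i in range(len(agents)):
--         if dones is None:
--             if reward_type == "A":
--                 max_reward += 1
--
--             else:
--                 max_reward += len(agents) - 1
--
--         else:
--             if not dones[i]:
--                 if reward_type == "A":
--                     max_reward += 1
--
--                 else:
--                     max_reward += len(agents) - 1
--
--     return max_reward
-- ===== SOURCE B (Python) =====
-- def max_env_reward(agents, dones=None, reward_type="B"):
--     if dones is None: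
--         active = len(agents)
--     else:
--         active = sum(1 for i in range(len(agents)) if not dones[i])
--     per_agent = 1 if reward_type == "A" else len(agents) - 1
--     return active * per_agent
-- ===== Notes on version B (the rewrite author's own statement) =====
-- stated objective: simpler
-- what changed: Replaces the per-iteration accumulation (with the branch re-evaluated every pass) by a single count of active agents multiplied by the per-agent reward computed once in closed form.
import Mathlib
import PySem

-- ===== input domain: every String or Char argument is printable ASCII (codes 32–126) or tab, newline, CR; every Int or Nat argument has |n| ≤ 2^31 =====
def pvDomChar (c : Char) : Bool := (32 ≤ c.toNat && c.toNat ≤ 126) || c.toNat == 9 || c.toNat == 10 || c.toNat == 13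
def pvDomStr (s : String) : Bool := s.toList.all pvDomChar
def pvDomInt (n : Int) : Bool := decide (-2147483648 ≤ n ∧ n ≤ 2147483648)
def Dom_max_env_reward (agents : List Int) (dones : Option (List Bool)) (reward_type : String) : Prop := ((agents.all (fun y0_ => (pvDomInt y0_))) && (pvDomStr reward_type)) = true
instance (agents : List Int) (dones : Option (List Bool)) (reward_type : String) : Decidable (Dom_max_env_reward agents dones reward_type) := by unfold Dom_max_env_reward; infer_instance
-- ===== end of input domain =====

-- B replaces the per-iteration accumulation by one active-agent count times a per-agent reward computed once (objective: simpler).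
-- ===== PORT A =====
def max_env_reward (agents : List Int) (dones : Option (List Bool)) (reward_type : String) : Int :=
  (PySem.List.pyRange 0 (agents.length : Int) 1).foldl (fun max_reward i =>
    match dones with
    | none =>
        if reward_type == "A" then max_reward + 1
        else max_reward + ((agents.length : Int) - 1)
    | some ds =>
        if !((PySem.List.pyGet? ds i).getD false) then
          if reward_type == "A" then max_reward + 1
          else max_reward + ((agents.length : Int) - 1)
        else max_reward) 0

-- ===== PORT B =====
def max_env_reward_alt (agents : List Int) (dones : Option (List Bool)) (reward_type : String) : Int :=
  let active : Int :=
    match dones with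
    | none => (agents.length : Int)
    | some ds => ((PySem.List.pyRange 0 (agents.length : Int) 1).filter
        (fun i => !((PySem.List.pyGet? ds i).getD false))).length
  let per_agent : Int := if reward_type == "A" then 1 else (agents.length : Int) - 1
  active * per_agent

-- ===== PRECONDITION & SPEC =====
-- Pre_ excludes inputs where both programs raise IndexError: dones given but shorter than agents.
def Pre_max_env_reward (agents : List Int) (dones : Option (List Bool)) (reward_type : String) : Prop :=
  ∀ ds ∈ dones, agents.length ≤ ds.length
instance (agents : List Int) (dones : Option (List Bool)) (reward_type : String) : Decidable (Pre_max_env_reward agents dones reward_type) := by unfold Pre_max_env_reward; infer_instance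
def pvWitness_max_env_reward : List Int × Option (List Bool) × String := ([1, 2, 3], some [true, false, true], "B")

def Spec_max_env_reward (agents : List Int) (dones : Option (List Bool)) (reward_type : String) (out : Int) : Prop := out = max_env_reward_alt agents dones reward_type
instance (agents : List Int) (dones : Option (List Bool)) (reward_type : String) (out : Int) : Decidable (Spec_max_env_reward agents dones reward_type out) := by unfold Spec_max_env_reward; infer_instance

-- ===== CLAIM (what is proved, stated in full; the proofs are below) =====
def Claim_equal_max_env_reward : Prop := ∀ (agents : List Int) (dones : Option (List Bool)) (reward_type : String), Dom_max_env_reward agents dones reward_type → Pre_max_env_reward agents dones reward_type → Spec_max_env_reward agents dones reward_type (max_env_reward agents dones reward_type)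

-- ===== LEMMAS AND PROOFS =====
-- The accumulator over any index list equals its start plus (number of active indices) * per-agent reward.
theorem foldl_count_mul (per : Int) (p : Int → Bool) (l : List Int) (acc : Int) :
    l.foldl (fun a i => if p i then a + per else a) acc
      = acc + ((l.filter p).length : Int) * per := by
  induction l generalizing acc with
  | nil => simp
  | cons x xs ih =>
      simp only [List.foldl_cons, List.filter_cons]
      by_cases h : p x <;> simp [h, ih] <;> ring


-- ===== VERDICT (by name: the statement is the Claim_ definition above) =====
theorem max_env_reward_spec : Claim_equal_max_env_reward := by

  intro agents dones reward_type _ _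
  unfold Spec_max_env_reward max_env_reward max_env_reward_alt
  cases dones with
  | none =>
      by_cases hA : reward_type == "A" <;>
        simpa [hA] using foldl_count_mul (if reward_type == "A" then 1 else (agents.length : Int) - 1)
          (fun _ => true) (PySem.List.pyRange 0 (agents.length : Int) 1) 0
  | some ds =>
      by_cases hA : reward_type == "A" <;>
        simpa [hA, mul_comm] using foldl_count_mul (if reward_type == "A" then 1 else (agents.length : Int) - 1)
          (fun i => !((PySem.List.pyGet? ds i).getD false)) (PySem.List.pyRange 0 (agents.length : Int) 1) 0
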